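-- pv_equiv track=rewrite | github.com/jiayiwangjw/pythonstudy | 4.5.12 return a new dictionary.py | stars
-- ===== SOURCE A (Python) =====
-- def stars(movies, tvshows):
--
--     #First, as usual: our goal is to create a new
--     #dictionary, so we start my initializing a new
--     #dictionary:
--
--     new_dict = {}
--
--     #Now, we want to separately go through the
--     #movies and tvshows dictionaries. Let's start with
--     #movies.
--     #
--     #We're going to iterate through every
--     #movie-performers pair in the dictionary:
--
--     for movie, performers in movies.items():
--
--         #Now, movie is a string, and performers is a
--         #list of strings. The strings in performers
--         #are people: that's what we want the keys to
--         #our new dictionary to be. So, we iterate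
--         #through each performer in this movie's list
--         #of performers:
--
--         for performer in performers:
--
--             #Now, performer is the name of one person.
--             #We want that person to be in new_dict as
--             #a key, with a list of their movies and
--             #TV shows as the value.
--             #
--             #If they're already in new_dict, we just
--             #want to add this movie to their list.
--             #But first, we should check to see if
--             #they're already in new_dict: if they
--             #aren't, then there's no list to add to!
--
--             if performer not in new_dict:
--
--                 #If they aren't, then we should create
--                 #a new key with this performer's name,
--                 #and give it an empty list as its value:
--
--                 new_dict[performer] = []
--
--             #Here, we can guarantee that performer is now
--             #a key in new_dict: if it wasn't before, we
--             #just added it! So, we can now add movie to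
--             #the list.
--             #
--             #We access the list with new_dict[performer],
--             #and we can then call append(movie) directly:
--
--             new_dict[performer].append(movie)
--
--             #And that's all! We've now added movie to this
--             #performer's value in new_dict. If this
--             #performer wasn't already in new_dict, we added
--             #them first.
--
--     #Next, we do the *exact* same thing for tvshows. In fact,
--     #it's identical: the code below is copy/pasted from above,
--     #but with tvshow used instead of movie. So, it works
--     #identically:
--     for tvshow, performers in tvshows.items():
--         for performer in performers:
--             if performer not in new_dict:
--                 new_dict[performer] = []
--             new_dict[performer].append(tvshow)
--
--     #Now, recall that we have to sort the names of each
--     #performer's movies and TV shows alphabetically. How do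
--     #we do that? We could have re-sorted them each time we
--     #appended a new movie or TV show, but that would be
--     #inefficient: we'd sort a lot more often than we need to.
--     #Instead, let's go through all the performers at the end
--     #and sort their lists.
--     #
--     #So, we iterate through each performer-performances pair
--     #in new_dict:
--
--     for performer, performances in new_dict.items():
--
--         #And sort the performances. Remember, lists are
--         #mutable, so any methods we run on them like
--         #performances.sort() change them in place: we don't
--         #need to set performances equal to the sorted version
--         #of itself.
--
--         performances.sort()
--
--     #Now we're done!
--
--     return new_dict
-- ===== SOURCE B (Python) =====
-- def stars(movies, tvshows):
--     # One global sort by title replaces A's per-performer sorts: titles are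
--     # appended in sorted order, so every performer's list comes out sorted.
--     items = list(movies.items()) + list(tvshows.items())
--     new_dict = {p: [] for _, performers in items for p in performers}
--     for title, performers in sorted(items, key=lambda kv: kv[0]):
--         for p in performers:
--             new_dict[p].append(title)
--     return new_dict
-- ===== Notes on version B (the rewrite author's own statement) =====
-- stated objective: alternative
-- what changed: Instead of appending titles in input order and then sorting each performer's list separately, B sorts the concatenated item list by title once and appends in that order, so the per-performer lists are born sorted and the final sort loop disappears.
import Mathlib
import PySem

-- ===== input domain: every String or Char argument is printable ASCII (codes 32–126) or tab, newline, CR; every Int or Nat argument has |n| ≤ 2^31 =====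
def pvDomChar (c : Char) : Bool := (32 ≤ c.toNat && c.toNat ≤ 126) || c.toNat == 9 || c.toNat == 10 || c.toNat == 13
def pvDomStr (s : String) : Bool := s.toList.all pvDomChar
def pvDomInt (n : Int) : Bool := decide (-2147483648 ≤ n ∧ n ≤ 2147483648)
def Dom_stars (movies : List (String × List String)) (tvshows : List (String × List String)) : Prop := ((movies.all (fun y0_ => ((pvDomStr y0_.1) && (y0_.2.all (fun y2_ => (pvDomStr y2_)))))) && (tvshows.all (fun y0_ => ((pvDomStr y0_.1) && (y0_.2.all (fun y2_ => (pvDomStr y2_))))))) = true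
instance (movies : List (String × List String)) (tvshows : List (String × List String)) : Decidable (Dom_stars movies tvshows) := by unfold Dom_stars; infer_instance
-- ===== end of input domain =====

-- B changes the algorithm: one global sort of the items by title replaces A's per-performer
-- list sorts (titles are appended in globally sorted order). Equivalence of return values.

-- ===== PORT A =====
-- inner 'for performer in performers: if performer not in new_dict: … ; new_dict[performer].append(title)'
def starsInner (title : String) (d : PySem.Dict String (List String)) (ps : List String) : PySem.Dict String (List String) :=
  ps.foldl (fun d p =>
    (if d.contains p = false then d.insert p ([] : List String) else d).modify p [] (fun l => l ++ [title])) d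

def stars (movies : List (String × List String)) (tvshows : List (String × List String)) : List (String × List String) :=
  -- 'for performer, performances in new_dict.items(): performances.sort()' sorts each value in place
  ((tvshows.foldl (fun d kv => starsInner kv.1 d kv.2)
      (movies.foldl (fun d kv => starsInner kv.1 d kv.2) PySem.Dict.empty)).items).map
    (fun p => (p.1, PySem.List.sorted p.2 (fun x => x) false))

-- ===== PORT B =====
def stars_alt (movies : List (String × List String)) (tvshows : List (String × List String)) : List (String × List String) :=
  -- new_dict = {p: [] for _, performers in items for p in performers}, then
  -- for title, performers in sorted(items, key=lambda kv: kv[0]): for p in performers: new_dict[p].append(title)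
  ((PySem.List.sorted (movies ++ tvshows) (fun kv => kv.1) false).foldl
    (fun d kv => kv.2.foldl (fun d p => d.modify p [] (fun l => l ++ [kv.1])) d)
    ((movies ++ tvshows).foldl (fun d kv => kv.2.foldl (fun d p => d.insert p ([] : List String)) d)
      PySem.Dict.empty)).items

-- ===== PRECONDITION & SPEC =====
def Spec_stars (movies : List (String × List String)) (tvshows : List (String × List String)) (out : List (String × List String)) : Prop := out = stars_alt movies tvshows
instance (movies : List (String × List String)) (tvshows : List (String × List String)) (out : List (String × List String)) : Decidable (Spec_stars movies tvshows out) := by unfold Spec_stars; infer_instance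

-- ===== CLAIM (what is proved, stated in full; the proofs are below) =====
def Claim_equal_stars : Prop := ∀ (movies : List (String × List String)) (tvshows : List (String × List String)), Dom_stars movies tvshows → Spec_stars movies tvshows (stars movies tvshows)

-- ===== LEMMAS AND PROOFS =====

-- (performer, title) pairs of an item list, in iteration order
def pvPairs (l : List (String × List String)) : List (String × String) :=
  l.flatMap (fun kv => kv.2.map (fun p => (p, kv.1)))

-- A's per-performer step equals the bare modify step
theorem pv_step_A (d : PySem.Dict String (List String)) (p title : String) :
    (if d.contains p = false then d.insert p ([] : List String) else d).modify p [] (fun l => l ++ [title])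
      = d.modify p [] (fun l => l ++ [title]) := by
  by_cases h : d.contains p = false
  · simp only [h, if_true]
    simp only [PySem.Dict.modify]
    rw [PySem.Dict.getD_insert_self, PySem.Dict.insert_insert_self,
        PySem.Dict.getD_of_not_contains d ([] : List String) h]
  · simp [h]

-- A's dict as a single fold over the pair stream
theorem pv_dictA_eq (movies tvshows : List (String × List String)) :
    (tvshows.foldl (fun d kv => starsInner kv.1 d kv.2)
      (movies.foldl (fun d kv => starsInner kv.1 d kv.2) PySem.Dict.empty))
    = (pvPairs (movies ++ tvshows)).foldl (fun d q => d.modify q.1 [] (fun l => l ++ [q.2])) PySem.Dict.empty := by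
  rw [← List.foldl_append, pvPairs, List.foldl_flatMap]
  apply PySem.List.foldl_congr_mem'
  intro kv _ d
  simp only [starsInner, List.foldl_map]
  apply PySem.List.foldl_congr_mem'
  intro p _ d
  exact pv_step_A d p kv.1

-- B's two folds as folds over pair streams
theorem pv_d0_eq (items : List (String × List String)) :
    items.foldl (fun d kv => kv.2.foldl (fun d p => d.insert p ([] : List String)) d) PySem.Dict.empty
    = (pvPairs items).foldl (fun d q => d.insert q.1 ([] : List String)) PySem.Dict.empty := by
  rw [pvPairs, List.foldl_flatMap]
  apply PySem.List.foldl_congr_mem'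
  intro kv _ d
  simp [List.foldl_map]

theorem pv_dB_eq (S : List (String × List String)) (d0 : PySem.Dict String (List String)) :
    S.foldl (fun d kv => kv.2.foldl (fun d p => d.modify p [] (fun l => l ++ [kv.1])) d) d0
    = (pvPairs S).foldl (fun d q => d.modify q.1 [] (fun l => l ++ [q.2])) d0 := by
  rw [pvPairs, List.foldl_flatMap]
  apply PySem.List.foldl_congr_mem'
  intro kv _ d
  simp [List.foldl_map]

-- every value of d0 is []
theorem pv_d0_getD (Q : List (String × String)) (d : PySem.Dict String (List String))
    (h : ∀ k, d.getD k [] = []) (k : String) :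
    (Q.foldl (fun d q => d.insert q.1 ([] : List String)) d).getD k [] = [] := by
  induction Q generalizing d with
  | nil => exact h k
  | cons q Q ih =>
      refine ih _ (fun k' => ?_)
      rw [PySem.Dict.getD_insert]
      split <;> simp [h]

-- the titles contributed to performer k by an item list
def pvTf (k : String) (kv : String × List String) : List String :=
  (kv.2.filter (fun p => p == k)).map (fun _ => kv.1)

theorem pv_filter_pairs (k : String) (l : List (String × List String)) :
    ((pvPairs l).filter (fun q => q.1 == k)).map (fun q => q.2) = l.flatMap (pvTf k) := by
  simp only [pvPairs, List.filter_flatMap, List.map_flatMap]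
  congr 1
  funext kv
  simp [pvTf, List.filter_map, List.map_map, Function.comp_def]

theorem pv_mem_tf (k : String) (kv : String × List String) (x : String) (hx : x ∈ pvTf k kv) : x = kv.1 := by
  simp [pvTf] at hx
  exact hx.2

-- core: sorting the stream by title makes every performer's list sorted
theorem pv_core (k : String) (l : List (String × List String)) :
    PySem.List.sorted (l.flatMap (pvTf k)) (fun x => x) false
      = (PySem.List.sorted l (fun kv => kv.1) false).flatMap (pvTf k) := by
  apply PySem.List.sorted_id_eq_of_perm_of_pairwise
  · exact List.Perm.flatMap_right _ (PySem.List.sorted_perm l (fun kv => kv.1) false)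
  · have hp : (PySem.List.sorted l (fun kv => kv.1) false).Pairwise (fun a b => a.1 ≤ b.1) :=
      PySem.List.sorted_pairwise l (fun kv => kv.1)
    rw [List.pairwise_flatMap]
    constructor
    · intro kv _
      apply List.Pairwise.imp_of_mem (R := fun a b => a = kv.1 ∧ b = kv.1)
      · rintro a b _ _ ⟨rfl, rfl⟩; exact le_refl _
      · apply List.pairwise_of_forall_mem_list
        intro a ha b hb
        exact ⟨pv_mem_tf k kv a ha, pv_mem_tf k kv b hb⟩
    · apply hp.imp_of_mem
      intro kv kv' _ _ h x hx y hy
      rw [pv_mem_tf k kv x hx, pv_mem_tf k kv' y hy]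
      exact h

theorem stars_spec : Claim_equal_stars := by
  intro movies tvshows _
  unfold Spec_stars stars stars_alt
  rw [pv_dictA_eq, pv_d0_eq, pv_dB_eq]
  set S := movies ++ tvshows with hS
  set P := pvPairs S with hP
  set P' := pvPairs (PySem.List.sorted S (fun kv => kv.1) false) with hP'
  set mstep : PySem.Dict String (List String) → String × String → PySem.Dict String (List String) :=
    fun d q => d.modify q.1 [] (fun l => l ++ [q.2]) with hmstep
  set d0 : PySem.Dict String (List String) := P.foldl (fun d q => d.insert q.1 ([] : List String)) PySem.Dict.empty with hd0
  set dA : PySem.Dict String (List String) := P.foldl mstep PySem.Dict.empty with hdA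
  set dB : PySem.Dict String (List String) := P'.foldl mstep d0 with hdB
  -- keys
  have hkA : dA.keys = PySem.Set.ofList (P.map (fun q => q.1)) := by
    rw [hdA, hmstep]
    rw [PySem.Dict.keys_foldl_modify_key (key := fun q : String × String => q.1)
        (f := fun d (q : String × String) => (fun l => l ++ [q.2]))]
    simp [PySem.Set.update_nil_left]
  have hk0 : d0.keys = PySem.Set.ofList (P.map (fun q => q.1)) := by
    rw [hd0]
    rw [PySem.Dict.keys_foldl_insert_key (key := fun q : String × String => q.1)
        (f := fun _ (_ : String × String) => ([] : List String))]
    simp [PySem.Set.update_nil_left]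
  have hPP' : P'.Perm P := by
    rw [hP, hP']
    exact List.Perm.flatMap_right _ (PySem.List.sorted_perm S (fun kv => kv.1) false)
  have hkB : dB.keys = PySem.Set.ofList (P.map (fun q => q.1)) := by
    rw [hdB, hmstep]
    rw [PySem.Dict.keys_foldl_modify_key (key := fun q : String × String => q.1)
        (f := fun d (q : String × String) => (fun l => l ++ [q.2]))]
    rw [hk0, PySem.Set.update_eq_append_filter]
    have hfil : (PySem.Set.ofList (P'.map (fun q => q.1))).filter
        (fun y => !(PySem.Set.contains (PySem.Set.ofList (P.map (fun q => q.1))) y)) = [] := by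
      apply List.filter_eq_nil_iff.mpr
      intro x hx
      have hxP : x ∈ P.map (fun q => q.1) := by
        rw [PySem.Set.mem_ofList] at hx
        exact (hPP'.map (fun q => q.1)).mem_iff.mp hx
      obtain ⟨q, hq, rfl⟩ := List.mem_map.mp hxP
      simp only [Bool.not_eq_eq_eq_not, Bool.not_true, PySem.Set.contains_eq_listContains]
      simp [PySem.Set.mem_ofList]
      exact ⟨q.2, by simpa using hq⟩
    rw [hfil, List.append_nil]
  have hnodA : dA.keys.Nodup := by rw [hkA]; exact PySem.Set.nodup_ofList _
  have hnodB : dB.keys.Nodup := by rw [hkB]; exact PySem.Set.nodup_ofList _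
  -- values
  have hvA : ∀ k, dA.getD k [] = (P.filter (fun q => q.1 == k)).map (fun q => q.2) := by
    intro k
    rw [hdA, hmstep, PySem.Dict.getD_foldl_modify_append, PySem.Dict.getD_empty]
    rfl
  have hv0 : ∀ k, d0.getD k [] = [] := by
    intro k
    rw [hd0]
    exact pv_d0_getD P PySem.Dict.empty (fun _ => PySem.Dict.getD_empty _ _) k
  have hvB : ∀ k, dB.getD k [] = (P'.filter (fun q => q.1 == k)).map (fun q => q.2) := by
    intro k
    rw [hdB, hmstep, PySem.Dict.getD_foldl_modify_append, hv0]
    rfl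
  -- items
  rw [PySem.Dict.items_eq_map_keys dA hnodA [], PySem.Dict.items_eq_map_keys dB hnodB [],
      hkA, hkB, List.map_map]
  apply List.map_congr_left
  intro k _
  simp only [Function.comp]
  refine congrArg (fun v => (k, v)) ?_
  rw [hvA, hvB, hP, hP', pv_filter_pairs, pv_filter_pairs]
  exact pv_core k S
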